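-- pv_equiv track=rewrite | github.com/jadonwu-dev/axwise-flow | backend/api/routes/customer_research.py | generate_fallback_suggestions
-- ===== SOURCE A (Python) =====
-- from typing import Dict, Any, List, Optional
--
-- def generate_fallback_suggestions(user_input: str, assistant_response: str) -> List[str]:
--     """Generate fallback suggestions when LLM fails."""
--
--     user_lower = user_input.lower()
--     response_lower = assistant_response.lower()
--
--     # If assistant is asking about business idea or problem
--     if any(phrase in response_lower for phrase in ["business", "idea", "problem", "solve", "core problem"]):
--         return ["Data management solution", "Customer analytics platform", "Workflow automation tool"]
--
--     # If assistant is asking about customers or target market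
--     elif any(phrase in response_lower for phrase in ["customer", "who", "target", "audience", "clients"]):
--         return ["Small businesses", "Enterprise companies", "Individual users"]
--
--     # If assistant is asking about specific problems or pain points
--     elif any(phrase in response_lower for phrase in ["pain", "challenge", "frustrating", "difficulty"]):
--         return ["Time consuming process", "Lack of visibility", "Manual work required"]
--
--     # If assistant is asking about features or functionality
--     elif any(phrase in response_lower for phrase in ["feature", "functionality", "how", "what does"]):
--         return ["Data integration", "Real-time analytics", "Automated reporting"]
--
--     # If assistant is confirming understanding
--     elif any(phrase in response_lower for phrase in ["confirm", "understand", "correct", "right", "sound"]):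
--         return ["Yes, that's correct", "Let me add something", "I need to clarify"]
--
--     # Default suggestions - user responses to continue conversation
--     else:
--         return ["Let me explain more", "That's exactly right", "I have more details"]
-- ===== SOURCE B (Python) =====
-- # B: flat phrase->priority map aggregated by a single min-priority pass, then an indexed output table
-- # (no if-elif chain, no early exit).
-- PHRASE_PRIORITY = {
--     "business": 0, "idea": 0, "problem": 0, "solve": 0, "core problem": 0,
--     "customer": 1, "who": 1, "target": 1, "audience": 1, "clients": 1,
--     "pain": 2, "challenge": 2, "frustrating": 2, "difficulty": 2,
--     "feature": 3, "functionality": 3, "how": 3, "what does": 3,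
--     "confirm": 4, "understand": 4, "correct": 4, "right": 4, "sound": 4,
-- }
--
-- SUGGESTIONS = [
--     ["Data management solution", "Customer analytics platform", "Workflow automation tool"],
--     ["Small businesses", "Enterprise companies", "Individual users"],
--     ["Time consuming process", "Lack of visibility", "Manual work required"],
--     ["Data integration", "Real-time analytics", "Automated reporting"],
--     ["Yes, that's correct", "Let me add something", "I need to clarify"],
--     ["Let me explain more", "That's exactly right", "I have more details"],
-- ]
--
--
-- def generate_fallback_suggestions(user_input: str, assistant_response: str) -> list:
--     user_lower = user_input.lower()
--     response_lower = assistant_response.lower()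
--     best = 5  # default suggestions
--     for phrase, priority in PHRASE_PRIORITY.items():
--         if phrase in response_lower:
--             best = min(best, priority)
--     return SUGGESTIONS[best]
-- ===== Notes on version B (the rewrite author's own statement) =====
-- stated objective: alternative
-- what changed: Replaces the five-branch if-elif chain over keyword groups with a flat phrase-to-priority map aggregated by a single minimum-priority pass (no early exit) and an indexed output table; correctness: group priorities are ordered 0..4 as the branches, so the minimum matching priority is the first matching branch.
import Mathlib
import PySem

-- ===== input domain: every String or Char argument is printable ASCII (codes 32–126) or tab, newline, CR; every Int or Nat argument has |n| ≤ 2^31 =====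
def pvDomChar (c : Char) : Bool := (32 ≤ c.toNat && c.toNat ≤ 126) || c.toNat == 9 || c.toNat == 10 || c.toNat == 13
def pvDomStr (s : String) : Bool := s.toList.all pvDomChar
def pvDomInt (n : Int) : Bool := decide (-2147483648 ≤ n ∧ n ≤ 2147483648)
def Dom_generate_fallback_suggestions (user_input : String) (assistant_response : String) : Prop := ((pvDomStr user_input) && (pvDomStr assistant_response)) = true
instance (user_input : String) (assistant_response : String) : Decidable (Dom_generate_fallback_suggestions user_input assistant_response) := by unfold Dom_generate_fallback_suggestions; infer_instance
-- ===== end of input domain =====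

-- B replaces A's if-elif chain with a flat phrase→priority map aggregated by one min-priority pass
-- and an indexed output table (alternative decomposition; equal cost).

-- ===== PORT A =====
def generate_fallback_suggestions (user_input : String) (assistant_response : String) : List String :=
  let _user_lower := PySem.Str.lower user_input
  let response_lower := PySem.Str.lower assistant_response
  if (["business", "idea", "problem", "solve", "core problem"].any
      (fun phrase => PySem.Str.isIn phrase response_lower)) then
    ["Data management solution", "Customer analytics platform", "Workflow automation tool"]
  else if (["customer", "who", "target", "audience", "clients"].any
      (fun phrase => PySem.Str.isIn phrase response_lower)) then
    ["Small businesses", "Enterprise companies", "Individual users"]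
  else if (["pain", "challenge", "frustrating", "difficulty"].any
      (fun phrase => PySem.Str.isIn phrase response_lower)) then
    ["Time consuming process", "Lack of visibility", "Manual work required"]
  else if (["feature", "functionality", "how", "what does"].any
      (fun phrase => PySem.Str.isIn phrase response_lower)) then
    ["Data integration", "Real-time analytics", "Automated reporting"]
  else if (["confirm", "understand", "correct", "right", "sound"].any
      (fun phrase => PySem.Str.isIn phrase response_lower)) then
    ["Yes, that's correct", "Let me add something", "I need to clarify"]
  else
    ["Let me explain more", "That's exactly right", "I have more details"]

-- ===== PORT B =====
-- PHRASE_PRIORITY as an association list in insertion order (all keys distinct)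
def pvPhrasePriority : List (String × Nat) :=
  [ ("business", 0), ("idea", 0), ("problem", 0), ("solve", 0), ("core problem", 0),
    ("customer", 1), ("who", 1), ("target", 1), ("audience", 1), ("clients", 1),
    ("pain", 2), ("challenge", 2), ("frustrating", 2), ("difficulty", 2),
    ("feature", 3), ("functionality", 3), ("how", 3), ("what does", 3),
    ("confirm", 4), ("understand", 4), ("correct", 4), ("right", 4), ("sound", 4) ]

def pvSuggestions : List (List String) :=
  [ ["Data management solution", "Customer analytics platform", "Workflow automation tool"],
    ["Small businesses", "Enterprise companies", "Individual users"],
    ["Time consuming process", "Lack of visibility", "Manual work required"],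
    ["Data integration", "Real-time analytics", "Automated reporting"],
    ["Yes, that's correct", "Let me add something", "I need to clarify"],
    ["Let me explain more", "That's exactly right", "I have more details"] ]

def generate_fallback_suggestions_alt (user_input : String) (assistant_response : String) : List String :=
  let _user_lower := PySem.Str.lower user_input
  let response_lower := PySem.Str.lower assistant_response
  let best := pvPhrasePriority.foldl
    (fun best pi => if PySem.Str.isIn pi.1 response_lower then min best pi.2 else best) 5
  -- SUGGESTIONS[best]: best is always in range 0..5
  pvSuggestions.getD best []

-- ===== PRECONDITION & SPEC =====
def Spec_generate_fallback_suggestions (user_input : String) (assistant_response : String) (out : List String) : Prop := out = generate_fallback_suggestions_alt user_input assistant_response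
instance (user_input : String) (assistant_response : String) (out : List String) : Decidable (Spec_generate_fallback_suggestions user_input assistant_response out) := by unfold Spec_generate_fallback_suggestions; infer_instance

-- ===== CLAIM =====
def Claim_equal_generate_fallback_suggestions : Prop := ∀ (user_input : String) (assistant_response : String), Dom_generate_fallback_suggestions user_input assistant_response → Spec_generate_fallback_suggestions user_input assistant_response (generate_fallback_suggestions user_input assistant_response)

-- ===== LEMMAS AND PROOFS =====

-- folding one priority group: result is `min acc i` iff some phrase of the group matches
theorem pv_fold_group (rl : String) (i : Nat) (phrases : List String) :
    ∀ acc : Nat,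
      (phrases.map (fun p => (p, i))).foldl
        (fun best pi => if PySem.Str.isIn pi.1 rl then min best pi.2 else best) acc
      = if phrases.any (fun p => PySem.Str.isIn p rl) then min acc i else acc := by
  induction phrases with
  | nil => intro acc; simp
  | cons h t ih =>
      intro acc
      simp only [List.map_cons, List.foldl_cons, List.any_cons]
      by_cases hm : PySem.Str.isIn h rl = true
      · rw [if_pos hm, ih]
        simp only [hm, Bool.true_or, if_true]
        by_cases ht : (t.any fun p => PySem.Str.isIn p rl) = true
        · rw [if_pos ht, min_assoc, min_self]
        · rw [if_neg ht]
      · rw [if_neg hm, ih]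
        simp only [hm, Bool.false_or]

-- ===== VERDICT =====
theorem generate_fallback_suggestions_spec : Claim_equal_generate_fallback_suggestions := by
  intro user_input assistant_response _
  unfold Spec_generate_fallback_suggestions generate_fallback_suggestions
    generate_fallback_suggestions_alt
  set rl := PySem.Str.lower assistant_response with hrl
  have hsplit : pvPhrasePriority
      = (["business", "idea", "problem", "solve", "core problem"].map (fun p => (p, 0)))
      ++ (["customer", "who", "target", "audience", "clients"].map (fun p => (p, 1)))
      ++ (["pain", "challenge", "frustrating", "difficulty"].map (fun p => (p, 2)))
      ++ (["feature", "functionality", "how", "what does"].map (fun p => (p, 3)))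
      ++ (["confirm", "understand", "correct", "right", "sound"].map (fun p => (p, 4))) := by
    rfl
  rw [hsplit]
  simp only [List.foldl_append, pv_fold_group]
  by_cases h0 : (["business", "idea", "problem", "solve", "core problem"].any
      (fun p => PySem.Str.isIn p rl)) = true <;>
  by_cases h1 : (["customer", "who", "target", "audience", "clients"].any
      (fun p => PySem.Str.isIn p rl)) = true <;>
  by_cases h2 : (["pain", "challenge", "frustrating", "difficulty"].any
      (fun p => PySem.Str.isIn p rl)) = true <;>
  by_cases h3 : (["feature", "functionality", "how", "what does"].any
      (fun p => PySem.Str.isIn p rl)) = true <;>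
  by_cases h4 : (["confirm", "understand", "correct", "right", "sound"].any
      (fun p => PySem.Str.isIn p rl)) = true <;>
  simp only [h0, h1, h2, h3, h4, if_true] <;> rfl
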